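-- pv_equiv track=rewrite | github.com/hamiltonalex/riskradar-boe | src/data/document_processor.py | group_documents_by_bank
-- ===== SOURCE A (Python) =====
-- from typing import Dict, List, Optional, Tuple
--
-- def group_documents_by_bank(documents: List[Dict]) -> Dict[str, List[Dict]]:
--     """Group documents by bank name"""
--     grouped = {}
--     for doc in documents:
--         bank = doc['metadata']['bank_name']
--         if bank not in grouped:
--             grouped[bank] = []
--         grouped[bank].append(doc)
--     return grouped
-- ===== SOURCE B (Python) =====
-- def group_documents_by_bank(documents):
--     """Group documents by bank name"""
--     banks = list(dict.fromkeys(doc['metadata']['bank_name'] for doc in documents))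
--     return {bank: [doc for doc in documents if doc['metadata']['bank_name'] == bank]
--             for bank in banks}
-- ===== Notes on version B (the rewrite author's own statement) =====
-- stated objective: alternative
-- what changed: replaces single-pass hash-bucket accumulation into a growing dict with a first-occurrence key list (dict.fromkeys) followed by one per-bank filter comprehension
import Mathlib
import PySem

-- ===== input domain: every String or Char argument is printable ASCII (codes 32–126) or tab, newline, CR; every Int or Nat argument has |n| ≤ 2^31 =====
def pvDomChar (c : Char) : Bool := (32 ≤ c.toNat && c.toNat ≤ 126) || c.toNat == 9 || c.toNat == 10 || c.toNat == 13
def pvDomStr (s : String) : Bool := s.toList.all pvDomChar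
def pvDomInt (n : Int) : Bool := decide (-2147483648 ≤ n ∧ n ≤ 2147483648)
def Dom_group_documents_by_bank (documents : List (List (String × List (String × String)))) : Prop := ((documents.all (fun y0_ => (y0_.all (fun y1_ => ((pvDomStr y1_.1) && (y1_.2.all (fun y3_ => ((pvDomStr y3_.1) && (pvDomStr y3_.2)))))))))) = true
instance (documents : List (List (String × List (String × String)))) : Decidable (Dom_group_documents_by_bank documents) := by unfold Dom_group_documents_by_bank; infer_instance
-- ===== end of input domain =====

-- B is an alternative decomposition (first-occurrence key list, then one filter per bank);
-- equivalence is about the returned dict, proved on inputs where every doc has the two keys.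

-- ===== PORT A =====
-- doc['metadata']['bank_name']; total form via getD — Pre_ excludes the inputs where Python raises KeyError
def pvBankOf (doc : List (String × List (String × String))) : String :=
  (PySem.Dict.mk ((PySem.Dict.mk doc).getD "metadata" [])).getD "bank_name" ""

def group_documents_by_bank (documents : List (List (String × List (String × String)))) : List (String × List (List (String × List (String × String)))) :=
  (documents.foldl (fun grouped doc =>
      let bank := pvBankOf doc
      let grouped := if grouped.contains bank then grouped else grouped.insert bank []
      grouped.modify bank [] (fun l => l ++ [doc]))
    PySem.Dict.empty).items

-- ===== PORT B =====
def group_documents_by_bank_alt (documents : List (List (String × List (String × String)))) : List (String × List (List (String × List (String × String)))) :=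
  let banks := PySem.List.dedup (documents.map pvBankOf)
  banks.map (fun bank => (bank, documents.filter (fun doc => pvBankOf doc == bank)))

-- ===== PRECONDITION & SPEC =====
-- Pre_: every doc has a 'metadata' key whose value has a 'bank_name' key (otherwise Python A raises KeyError)
def Pre_group_documents_by_bank (documents : List (List (String × List (String × String)))) : Prop :=
  (documents.all (fun doc =>
    (PySem.Dict.mk doc).contains "metadata" &&
    (PySem.Dict.mk ((PySem.Dict.mk doc).getD "metadata" [])).contains "bank_name")) = true
instance (documents : List (List (String × List (String × String)))) : Decidable (Pre_group_documents_by_bank documents) := by unfold Pre_group_documents_by_bank; infer_instance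

def pvWitness_group_documents_by_bank : (List (List (String × List (String × String)))) :=
  [[("metadata", [("bank_name", "HSBC")])], [("metadata", [("bank_name", "Barclays")]), ("text", [])]]

def Spec_group_documents_by_bank (documents : List (List (String × List (String × String)))) (out : List (String × List (List (String × List (String × String))))) : Prop := out = group_documents_by_bank_alt documents
instance (documents : List (List (String × List (String × String)))) (out : List (String × List (List (String × List (String × String))))) : Decidable (Spec_group_documents_by_bank documents out) := by
  unfold Spec_group_documents_by_bank
  exact
    let h3 : DecidableEq (List (List (String × List (String × String)))) := inferInstance
    @instDecidableEqList _ (@instDecidableEqProd _ _ _ h3) _ _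

-- ===== CLAIM (what is proved, stated in full; the proofs are below) =====
def Claim_equal_group_documents_by_bank : Prop := ∀ (documents : List (List (String × List (String × String)))), Dom_group_documents_by_bank documents → Pre_group_documents_by_bank documents → Spec_group_documents_by_bank documents (group_documents_by_bank documents)

-- ===== LEMMAS AND PROOFS =====

-- the insert-if-absent guard before modify is redundant for the resulting dict
theorem pv_step_eq (d : PySem.Dict String (List (List (String × List (String × String)))))
    (b : String) (doc : List (String × List (String × String))) :
    (if d.contains b then d else d.insert b []).modify b [] (fun l => l ++ [doc])
      = d.modify b [] (fun l => l ++ [doc]) := by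
  by_cases h : d.contains b
  · simp [h]
  · simp only [h]
    simp [PySem.Dict.modify, PySem.Dict.insert_insert_self, PySem.Dict.getD_insert_self,
      PySem.Dict.getD_of_not_contains d [] (by simpa using h)]

-- value of the grouping fold at a key
theorem pv_getD_fold (l : List (List (String × List (String × String))))
    (d : PySem.Dict String (List (List (String × List (String × String))))) (c : String) :
    (l.foldl (fun d doc => d.modify (pvBankOf doc) [] (fun v => v ++ [doc])) d).getD c []
      = d.getD c [] ++ (l.filter (fun doc => pvBankOf doc == c)) := by
  induction l generalizing d with
  | nil => simp
  | cons x xs ih =>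
    simp only [List.foldl_cons, List.filter_cons, ih]
    rw [PySem.Dict.getD_modify]
    by_cases h : pvBankOf x = c
    · simp [h]
    · rw [if_neg (fun hc => h hc.symm)]
      simp [h]

theorem group_documents_by_bank_eq_fold (documents : List (List (String × List (String × String)))) :
    group_documents_by_bank documents
      = (documents.foldl (fun d doc => d.modify (pvBankOf doc) [] (fun v => v ++ [doc])) PySem.Dict.empty).items := by
  unfold group_documents_by_bank
  congr 1
  apply PySem.List.foldl_congr_mem
  intro d doc _
  exact pv_step_eq d (pvBankOf doc) doc

-- ===== VERDICT (by name: the statement is the Claim_ definition above) =====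
theorem group_documents_by_bank_spec : Claim_equal_group_documents_by_bank := by
  intro documents _ _
  unfold Spec_group_documents_by_bank group_documents_by_bank_alt
  rw [group_documents_by_bank_eq_fold]
  have hnd : (documents.foldl (fun d doc => d.modify (pvBankOf doc) [] (fun v => v ++ [doc])) PySem.Dict.empty).keys.Nodup :=
    PySem.Dict.nodup_keys_foldl_modify_key documents pvBankOf [] _ PySem.Dict.empty (by simp)
  rw [PySem.Dict.items_eq_map_keys _ hnd []]
  rw [PySem.Dict.keys_foldl_modify_key]
  simp only [PySem.List.dedup_eq_ofList]
  rw [show (PySem.Dict.empty : PySem.Dict String (List (List (String × List (String × String))))).keys = [] from rfl,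
    PySem.Set.update_nil_left]
  apply List.map_congr_left
  intro b _
  rw [pv_getD_fold]
  simp
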